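-- pv_equiv track=rewrite | github.com/markli404/community_operation_toolkit | github/github_util.py | get_counts_from_dates
-- ===== SOURCE A (Python) =====
-- def get_counts_from_dates(dates_raw):
--     dates, counts = [], []
--
--     prev = dates_raw[0]
--     count = 0
--     for date in dates_raw:
--         if date != prev:
--             dates.append(date)
--             counts.append(count)
--             prev = date
--             count = 1
--         else:
--             count += 1
--
--     return dates, counts
-- ===== SOURCE B (Python) =====
-- def get_counts_from_dates(dates_raw):
--     # Mark transitions by pairwise comparison, then derive counts as differences
--     # of the transition positions -- no running counter at all.
--     flags = [b != a for a, b in zip(dates_raw, dates_raw[1:])]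
--     dates = [d for d, f in zip(dates_raw[1:], flags) if f]
--     cuts = [i + 1 for i, f in enumerate(flags) if f]
--     counts = [b - a for a, b in zip([0] + cuts, cuts)]
--     return dates, counts
-- ===== Notes on version B (the rewrite author's own statement) =====
-- stated objective: alternative
-- what changed: B keeps no running counter: it marks the transitions by a pairwise zip of the list with its own tail, reads the new dates off the marked positions, and obtains the counts as differences of consecutive transition indices, in staged passes instead of A's single accumulating loop.
import Mathlib
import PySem

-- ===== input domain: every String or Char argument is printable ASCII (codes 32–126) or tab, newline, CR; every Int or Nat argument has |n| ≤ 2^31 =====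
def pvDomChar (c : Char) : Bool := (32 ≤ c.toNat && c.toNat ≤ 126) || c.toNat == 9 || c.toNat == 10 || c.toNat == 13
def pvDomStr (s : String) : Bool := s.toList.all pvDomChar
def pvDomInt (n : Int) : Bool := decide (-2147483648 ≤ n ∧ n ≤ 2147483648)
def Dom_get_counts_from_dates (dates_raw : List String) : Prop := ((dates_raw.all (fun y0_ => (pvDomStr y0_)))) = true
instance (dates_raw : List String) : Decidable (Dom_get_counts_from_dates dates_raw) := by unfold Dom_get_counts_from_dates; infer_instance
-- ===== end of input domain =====

-- B marks transitions by pairwise zip and derives the counts as differences of transition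
-- positions (no running counter), instead of A's single prev/count loop.


-- ===== PORT A =====
-- the for-loop of A: state (prev, count, dates, counts)
def pvGoA (prev : String) (count : Int) (dates : List String) (counts : List Int) :
    List String → List String × List Int
  | [] => (dates, counts)
  | d :: rest =>
    if d ≠ prev then pvGoA d 1 (dates ++ [d]) (counts ++ [count]) rest
    else pvGoA prev (count + 1) dates counts rest

def get_counts_from_dates (dates_raw : List String) : List String × List Int :=
  match dates_raw with
  | [] => ([], [])            -- Python raises IndexError on dates_raw[0]; excluded by Pre_
  | p :: _ => pvGoA p 0 [] [] dates_raw

-- ===== PORT B =====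
-- Source B line by line; dates_raw[1:] is List.tail (exact: slice from 1 of a list)
def get_counts_from_dates_alt (dates_raw : List String) : List String × List Int :=
  let flags := (dates_raw.zip dates_raw.tail).map (fun p => decide (p.2 ≠ p.1))
  let dates := ((dates_raw.tail.zip flags).filter (fun p => p.2)).map Prod.fst
  let cuts := ((PySem.List.enumerate flags 0).filter (fun p => p.2)).map (fun p => p.1 + 1)
  let counts := (((0 : Int) :: cuts).zip cuts).map (fun p => p.2 - p.1)
  (dates, counts)

-- ===== PRECONDITION & SPEC =====
-- Pre_ excludes only the empty list, on which A raises IndexError (dates_raw[0]).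
def Pre_get_counts_from_dates (dates_raw : List String) : Prop := dates_raw ≠ []
instance (dates_raw : List String) : Decidable (Pre_get_counts_from_dates dates_raw) := by unfold Pre_get_counts_from_dates; infer_instance
def pvWitness_get_counts_from_dates : List String := ["2024-01-01", "2024-01-01", "2024-01-02"]

def Spec_get_counts_from_dates (dates_raw : List String) (out : List String × List Int) : Prop := out = get_counts_from_dates_alt dates_raw
instance (dates_raw : List String) (out : List String × List Int) : Decidable (Spec_get_counts_from_dates dates_raw out) := by unfold Spec_get_counts_from_dates; infer_instance

-- ===== CLAIM (what is proved, stated in full; the proofs are below) =====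
def Claim_equal_get_counts_from_dates : Prop := ∀ (dates_raw : List String), Dom_get_counts_from_dates dates_raw → Pre_get_counts_from_dates dates_raw → Spec_get_counts_from_dates dates_raw (get_counts_from_dates dates_raw)

-- ===== LEMMAS AND PROOFS =====

-- Reference recursion: the run list (new value at each transition, length of the ended run).
def pvSpecRec (p : String) (c : Int) : List String → List String × List Int
  | [] => ([], [])
  | d :: rest =>
    if d = p then pvSpecRec p (c + 1) rest
    else ((pvSpecRec d 1 rest).1.cons d, (pvSpecRec d 1 rest).2.cons c)

-- A's loop appends onto its accumulators exactly what pvSpecRec computes.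
theorem pvGoA_eq_spec (rest : List String) :
    ∀ (p : String) (c : Int) (ds : List String) (cs : List Int),
    pvGoA p c ds cs rest = (ds ++ (pvSpecRec p c rest).1, cs ++ (pvSpecRec p c rest).2) := by
  induction rest with
  | nil => intro p c ds cs; simp [pvGoA, pvSpecRec]
  | cons d rest ih =>
    intro p c ds cs
    by_cases h : d = p
    · subst h; simp [pvGoA, pvSpecRec, ih]
    · simp [pvGoA, pvSpecRec, h, ih]

-- the Bool flag list of B for input p :: rest
def pvFlags (xs : List String) : List Bool :=
  (xs.zip xs.tail).map (fun p => decide (p.2 ≠ p.1))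

theorem pvFlags_cons (p d : String) (r : List String) :
    pvFlags (p :: d :: r) = decide (d ≠ p) :: pvFlags (d :: r) := by
  simp [pvFlags]

-- B's dates component equals pvSpecRec's first component.
theorem pvDates_eq (rest : List String) :
    ∀ (p : String) (c : Int),
    ((rest.zip (pvFlags (p :: rest))).filter (fun q => q.2)).map Prod.fst
      = (pvSpecRec p c rest).1 := by
  induction rest with
  | nil => intro p c; simp [pvFlags, pvSpecRec]
  | cons d r ih =>
    intro p c
    rw [pvFlags_cons]
    by_cases h : d = p
    · subst h; simpa [pvSpecRec] using ih d (c + 1)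
    · simp [pvSpecRec, h, ih d 1]

-- transition positions, shifted by one (the values B's comprehension produces), from index s
def pvCutsFrom (s : Int) : List Bool → List Int
  | [] => []
  | f :: fs => if f then (s + 1) :: pvCutsFrom (s + 1) fs else pvCutsFrom (s + 1) fs

theorem pvEnum_filter_eq_cutsFrom (fs : List Bool) :
    ∀ (s : Int),
    ((PySem.List.enumerate fs s).filter (fun p => p.2)).map (fun p => p.1 + 1)
      = pvCutsFrom s fs := by
  induction fs with
  | nil => intro s; simp [PySem.List.enumerate_nil, pvCutsFrom]
  | cons f fs ih =>
    intro s
    rw [PySem.List.enumerate_cons]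
    by_cases h : f = true <;> simp [pvCutsFrom, h, List.filter, ih (s + 1)]

-- differences of adjacent cut positions (with base prepended)
def pvDiffs (base : Int) (cuts : List Int) : List Int :=
  ((base :: cuts).zip cuts).map (fun p => p.2 - p.1)

-- run-length recursion over the flag list alone
def pvG (c : Int) : List Bool → List Int
  | [] => []
  | f :: fs => if f then c :: pvG 1 fs else pvG (c + 1) fs

theorem pvDiffs_cons (base c : Int) (t : List Int) :
    pvDiffs base (c :: t) = (c - base) :: pvDiffs c t := by
  simp [pvDiffs]

theorem pvDiffs_cutsFrom (fs : List Bool) :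
    ∀ (s base : Int), pvDiffs base (pvCutsFrom s fs) = pvG (s + 1 - base) fs := by
  induction fs with
  | nil => intro s base; simp [pvCutsFrom, pvDiffs, pvG]
  | cons f fs ih =>
    intro s base
    by_cases h : f = true
    · simp only [pvCutsFrom, h, if_true, pvG, pvDiffs_cons, ih (s + 1) (s + 1)]
      ring_nf
    · simp only [pvCutsFrom, h, if_false, pvG, Bool.false_eq_true, ih (s + 1) base]
      ring_nf

-- pvG over the flags equals pvSpecRec's second component.
theorem pvG_flags_eq (rest : List String) :
    ∀ (p : String) (c : Int), pvG c (pvFlags (p :: rest)) = (pvSpecRec p c rest).2 := by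
  induction rest with
  | nil => intro p c; simp [pvFlags, pvG, pvSpecRec]
  | cons d r ih =>
    intro p c
    rw [pvFlags_cons]
    by_cases h : d = p
    · subst h; simpa [pvG, pvSpecRec] using ih d (c + 1)
    · simp [pvG, pvSpecRec, h, ih d 1]

-- ===== VERDICT (by name: the statement is the Claim_ definition above) =====
theorem get_counts_from_dates_spec : Claim_equal_get_counts_from_dates := by
  intro dates_raw _ hpre
  unfold Spec_get_counts_from_dates
  match dates_raw with
  | [] => exact absurd rfl hpre
  | p :: rest =>
    show pvGoA p 0 [] [] (p :: rest) = _
    have h0 : pvGoA p 0 [] [] (p :: rest) = pvGoA p 1 [] [] rest := by simp [pvGoA]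
    rw [h0, pvGoA_eq_spec, get_counts_from_dates_alt]
    simp only [List.nil_append, List.tail_cons]
    rw [show ((p :: rest).zip rest).map (fun q => decide (q.2 ≠ q.1)) = pvFlags (p :: rest) from rfl]
    rw [pvDates_eq rest p 1, pvEnum_filter_eq_cutsFrom]
    rw [show (((0 : Int) :: pvCutsFrom 0 (pvFlags (p :: rest))).zip
          (pvCutsFrom 0 (pvFlags (p :: rest)))).map (fun q => q.2 - q.1)
        = pvDiffs 0 (pvCutsFrom 0 (pvFlags (p :: rest))) from rfl]
    rw [pvDiffs_cutsFrom]
    norm_num [pvG_flags_eq rest p 1]
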